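-- pv_equiv track=rewrite | github.com/xia9701/deterministic-dus-sc | unary_mul_quality/baselines.py | get_lfsr_thresholds_for_N
-- ===== SOURCE A (Python) =====
-- from typing import List, Tuple
--
-- BIT_WIDTH_LFSR = 12
--
-- def get_lfsr_thresholds_for_N(lengthN: int, seq: List[int]) -> List[int]:
--     """
--     Matches your original mapping:
--       a_val = (sr * lengthN) // 2^BIT_WIDTH_LFSR
--       clamp to [0, lengthN-1]
--     """
--     period = len(seq)
--     out = []
--     for i in range(lengthN):
--         sr = seq[i % period]
--         a_val = (sr * lengthN) // (1 << BIT_WIDTH_LFSR)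
--         if a_val >= lengthN:
--             a_val = lengthN - 1
--         out.append(a_val)
--     return out
-- ===== SOURCE B (Python) =====
-- from typing import List, Tuple
--
-- BIT_WIDTH_LFSR = 12
--
-- def get_lfsr_thresholds_for_N(lengthN: int, seq: List[int]) -> List[int]:
--     # Precompute one clamped threshold per sequence element, then emit by
--     # cyclic indexing into that table (no per-output recomputation).
--     thr = []
--     for sr in seq:
--         a = (sr * lengthN) // (1 << BIT_WIDTH_LFSR)
--         thr.append(lengthN - 1 if a >= lengthN else a)
--     period = len(seq)
--     return [thr[i % period] for i in range(lengthN)]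
-- ===== Notes on version B (the rewrite author's own statement) =====
-- stated objective: alternative
-- what changed: A recomputes the mapped, clamped threshold inside its single output loop for every i; B first precomputes one clamped threshold per sequence element into a table and then emits the output by cyclic indexing into that table, so the map/clamp work is done len(seq) times instead of lengthN times.
import Mathlib
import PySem

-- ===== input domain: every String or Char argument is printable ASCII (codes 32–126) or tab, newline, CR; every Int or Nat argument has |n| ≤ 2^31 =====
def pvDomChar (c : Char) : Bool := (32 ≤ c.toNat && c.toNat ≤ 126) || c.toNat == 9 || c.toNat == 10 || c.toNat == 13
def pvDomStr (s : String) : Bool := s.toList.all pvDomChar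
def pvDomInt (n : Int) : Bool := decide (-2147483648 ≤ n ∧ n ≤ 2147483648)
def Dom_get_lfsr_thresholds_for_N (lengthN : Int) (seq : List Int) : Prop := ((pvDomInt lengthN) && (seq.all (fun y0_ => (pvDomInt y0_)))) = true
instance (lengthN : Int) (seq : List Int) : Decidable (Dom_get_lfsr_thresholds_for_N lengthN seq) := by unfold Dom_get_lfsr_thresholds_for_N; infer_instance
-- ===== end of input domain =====

-- B precomputes one clamped threshold per sequence element into a table and emits
-- the output by cyclic indexing, instead of A's single fused loop that recomputes
-- the map/clamp for every output position (alternative decomposition, same cost class).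


-- ===== PORT A =====
-- literal port of A's fused loop; seq[i % period] is exact under Pre_ (i % period is
-- always a valid index when seq ≠ []; the .getD 0 default is never reached there)
def get_lfsr_thresholds_for_N (lengthN : Int) (seq : List Int) : List Int :=
  let period : Int := (seq.length : Int)
  (PySem.List.pyRange 0 lengthN 1).foldl (fun out i =>
    let sr := (PySem.List.pyGet? seq (PySem.Int.mod i period)).getD 0
    let a_val := PySem.Int.floordiv (sr * lengthN) ((1 : Int) <<< 12)
    out ++ [if a_val ≥ lengthN then lengthN - 1 else a_val]) []

-- ===== PORT B =====
-- port of Source B: build the table thr, then emit by cyclic indexing (getD exact under Pre_)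
def get_lfsr_thresholds_for_N_alt (lengthN : Int) (seq : List Int) : List Int :=
  let thr := seq.map (fun sr =>
    let a := PySem.Int.floordiv (sr * lengthN) ((1 : Int) <<< 12)
    if a ≥ lengthN then lengthN - 1 else a)
  let period : Int := (seq.length : Int)
  (PySem.List.pyRange 0 lengthN 1).map (fun i =>
    (PySem.List.pyGet? thr (PySem.Int.mod i period)).getD 0)

-- ===== PRECONDITION & SPEC =====
-- Pre_ excludes exactly the inputs where the Python raises ZeroDivisionError
-- (seq empty with lengthN > 0, i % 0 in the loop); both A and B raise there.
def Pre_get_lfsr_thresholds_for_N (lengthN : Int) (seq : List Int) : Prop :=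
  seq ≠ [] ∨ lengthN ≤ 0
instance (lengthN : Int) (seq : List Int) : Decidable (Pre_get_lfsr_thresholds_for_N lengthN seq) := by unfold Pre_get_lfsr_thresholds_for_N; infer_instance
def pvWitness_get_lfsr_thresholds_for_N : Int × List Int := (5, [100, 2000, 4000])

def Spec_get_lfsr_thresholds_for_N (lengthN : Int) (seq : List Int) (out : List Int) : Prop := out = get_lfsr_thresholds_for_N_alt lengthN seq
instance (lengthN : Int) (seq : List Int) (out : List Int) : Decidable (Spec_get_lfsr_thresholds_for_N lengthN seq out) := by unfold Spec_get_lfsr_thresholds_for_N; infer_instance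

-- ===== CLAIM (what is proved, stated in full; the proofs are below) =====
def Claim_equal_get_lfsr_thresholds_for_N : Prop := ∀ (lengthN : Int) (seq : List Int), Dom_get_lfsr_thresholds_for_N lengthN seq → Pre_get_lfsr_thresholds_for_N lengthN seq → Spec_get_lfsr_thresholds_for_N lengthN seq (get_lfsr_thresholds_for_N lengthN seq)

-- ===== LEMMAS AND PROOFS =====

theorem get_lfsr_thresholds_for_N_spec : Claim_equal_get_lfsr_thresholds_for_N := by
  intro lengthN seq _ hpre
  unfold Spec_get_lfsr_thresholds_for_N get_lfsr_thresholds_for_N get_lfsr_thresholds_for_N_alt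
  rw [PySem.List.foldl_append_singleton_eq_map]
  simp only [List.nil_append]
  by_cases hnil : seq = []
  · subst hnil
    rcases hpre with h | h
    · exact absurd rfl h
    · have hr : PySem.List.pyRange 0 lengthN 1 = [] := by
        rw [PySem.List.pyRange_one]
        simp
        omega
      simp [hr]
  · apply List.map_congr_left
    intro i _
    have hp : (0:Int) < (seq.length : Int) := by
      exact_mod_cast List.length_pos_iff.mpr hnil
    have h0 : 0 ≤ PySem.Int.mod i (seq.length : Int) := PySem.Int.mod_nonneg i hp
    have hl : PySem.Int.mod i (seq.length : Int) < (seq.length : Int) := PySem.Int.mod_lt i hp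
    have ht : (PySem.Int.mod i (seq.length : Int)).toNat < seq.length := by omega
    rw [PySem.List.pyGet?_of_nonneg seq h0, PySem.List.pyGet?_of_nonneg _ h0,
        List.getElem?_map, List.getElem?_eq_getElem ht]
    simp only [Option.map_some, Option.getD_some]

-- ===== VERDICT (by name: the statement is the Claim_ definition above) =====
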